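-- pv_equiv track=rewrite | github.com/Cryptinterested/DATA-AI | Apriori.py | apparaitEpsilonFois
-- ===== SOURCE A (Python) =====
-- def contientPlusieursFois(tab) : # Permet de tester si un tableau d'entiers contient plusieurs fois les même entiers, cette méthode complète contient(T1,T2)
-- 	for nb in tab :
-- 		if tab.count(nb) > 1 :
-- 			return True
-- 	return False
--
-- def apparaitEpsilonFois(nuplet, T, epsilon) : #Permet de tester si un uplet apparait epsilon fois dans les sous tableaux de T
-- 	compteur = 0
-- 	if contientPlusieursFois(nuplet) :
-- 		return False
-- 	else :
-- 		for tab in T :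
-- 			if contient(tab,nuplet) :
-- 				compteur = compteur + 1
-- 	return compteur >= epsilon
--
-- def contient(T1,T2) : # Permet de tester si T1 contient les elements de T2 , ex [1,3,2] et [1,2]
-- 	b = True
-- 	for nb in T2 :
-- 		if nb not in T1 :
-- 			b = False
-- 	return b
-- ===== SOURCE B (Python) =====
-- def apparaitEpsilonFois(nuplet, T, epsilon):
--     if len(set(nuplet)) != len(nuplet):
--         return False
--     candidates = set(range(len(T)))
--     for nb in nuplet:
--         candidates &= {i for i, tab in enumerate(T) if nb in tab}
--     return len(candidates) >= epsilon
-- ===== Notes on version B (the rewrite author's own statement) =====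
-- stated objective: alternative
-- what changed: Replaces A's per-subtable scan (each subtable checked against every element of nuplet) by an inverted-index intersection: a shrinking set of candidate subtable indices is intersected, element by element of nuplet, with the set of indices of subtables containing that element.
import Mathlib
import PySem

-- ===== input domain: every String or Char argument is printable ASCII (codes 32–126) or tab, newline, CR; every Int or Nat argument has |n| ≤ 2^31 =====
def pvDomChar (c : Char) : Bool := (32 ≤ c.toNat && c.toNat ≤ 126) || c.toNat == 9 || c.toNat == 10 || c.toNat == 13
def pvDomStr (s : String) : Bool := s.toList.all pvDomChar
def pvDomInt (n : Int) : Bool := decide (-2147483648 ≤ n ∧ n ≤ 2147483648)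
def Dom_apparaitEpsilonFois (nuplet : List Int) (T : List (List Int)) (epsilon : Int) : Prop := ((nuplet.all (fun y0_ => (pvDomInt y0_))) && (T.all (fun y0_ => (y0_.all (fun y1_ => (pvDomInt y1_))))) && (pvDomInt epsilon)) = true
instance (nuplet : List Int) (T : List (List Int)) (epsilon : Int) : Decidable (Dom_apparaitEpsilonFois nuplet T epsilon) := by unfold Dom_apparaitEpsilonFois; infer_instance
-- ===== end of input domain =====

-- B replaces A's per-subtable scan by an intersection of candidate subtable indices,
-- traversing element-by-element of nuplet (alternative decomposition, same exact result).

-- ===== PORT A =====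
def contientPlusieursFoisA (tab : List Int) : Bool :=
  tab.any (fun nb => decide (PySem.List.count tab nb > 1))

def contientA (T1 T2 : List Int) : Bool :=
  T2.foldl (fun b nb => if T1.contains nb = false then false else b) true

def apparaitEpsilonFois (nuplet : List Int) (T : List (List Int)) (epsilon : Int) : Bool :=
  let compteur : Int := 0
  if contientPlusieursFoisA nuplet then false
  else
    let compteur := T.foldl (fun c tab => if contientA tab nuplet then c + 1 else c) compteur
    decide (compteur ≥ epsilon)

-- ===== PORT B =====
-- {i for i, tab in enumerate(T) if nb in tab}
def pvIndices (T : List (List Int)) (nb : Int) : PySem.Set Int :=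
  PySem.Set.ofList ((PySem.List.enumerate T 0).filterMap
    (fun p => if p.2.contains nb then some p.1 else none))

def apparaitEpsilonFois_alt (nuplet : List Int) (T : List (List Int)) (epsilon : Int) : Bool :=
  if (PySem.Set.ofList nuplet).length ≠ nuplet.length then false
  else
    let candidates := nuplet.foldl
      (fun cand nb => PySem.Set.inter cand (pvIndices T nb))
      (PySem.Set.ofList (PySem.List.pyRange 0 (T.length : Int) 1))
    decide ((candidates.length : Int) ≥ epsilon)

-- ===== PRECONDITION & SPEC =====
def Spec_apparaitEpsilonFois (nuplet : List Int) (T : List (List Int)) (epsilon : Int) (out : Bool) : Prop := out = apparaitEpsilonFois_alt nuplet T epsilon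
instance (nuplet : List Int) (T : List (List Int)) (epsilon : Int) (out : Bool) : Decidable (Spec_apparaitEpsilonFois nuplet T epsilon out) := by unfold Spec_apparaitEpsilonFois; infer_instance

-- ===== CLAIM (what is proved, stated in full; the proofs are below) =====
def Claim_equal_apparaitEpsilonFois : Prop := ∀ (nuplet : List Int) (T : List (List Int)) (epsilon : Int), Dom_apparaitEpsilonFois nuplet T epsilon → Spec_apparaitEpsilonFois nuplet T epsilon (apparaitEpsilonFois nuplet T epsilon)

-- ===== LEMMAS AND PROOFS =====

-- A's duplicate guard detects exactly non-Nodup lists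
theorem cpfA_eq (tab : List Int) : contientPlusieursFoisA tab = !decide tab.Nodup := by
  unfold contientPlusieursFoisA
  by_cases h : tab.Nodup
  · simp only [h, decide_true, Bool.not_true, List.any_eq_false]
    intro nb hnb
    have hcount := List.nodup_iff_count_le_one.mp h nb
    simp only [PySem.List.count_eq, decide_eq_true_eq, gt_iff_lt, not_lt]
    exact hcount
  · have h' : ¬ tab.Nodup := h
    rw [List.nodup_iff_count_le_one] at h
    push Not at h
    obtain ⟨a, ha⟩ := h
    have hm : a ∈ tab := by
      by_contra hm
      simp [List.count_eq_zero_of_not_mem hm] at ha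
    rw [decide_eq_false h', Bool.not_false]
    refine List.any_eq_true.mpr ⟨a, hm, ?_⟩
    simp only [PySem.List.count_eq, decide_eq_true_eq]
    exact_mod_cast ha

-- B's duplicate guard detects exactly non-Nodup lists
theorem ofList_length_eq_iff (xs : List Int) :
    (PySem.Set.ofList xs).length = xs.length ↔ xs.Nodup := by
  constructor
  · intro h
    have hsub : List.Subperm (PySem.Set.ofList xs) xs :=
      List.Nodup.subperm (PySem.Set.nodup_ofList xs)
        (fun y hy => (PySem.Set.mem_ofList xs y).mp hy)
    have hperm := hsub.perm_of_length_le (le_of_eq h.symm)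
    exact hperm.nodup_iff.mp (PySem.Set.nodup_ofList xs)
  · intro h
    rw [PySem.Set.ofList_eq_self_of_nodup xs h]

-- A's 'contient' is List.all
theorem contientA_eq (T1 T2 : List Int) : contientA T1 T2 = T2.all (fun nb => T1.contains nb) := by
  unfold contientA
  suffices h : ∀ (l : List Int) (b : Bool),
      l.foldl (fun b nb => if T1.contains nb = false then false else b) b
        = (b && l.all (fun nb => T1.contains nb)) by
    simpa using h T2 true
  intro l
  induction l with
  | nil => simp
  | cons x xs ih =>
    intro b
    rw [List.foldl_cons, ih]
    by_cases hx : x ∈ T1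
    · simp [hx]
    · simp [hx]

-- the intersection fold is one filter by 'all'
theorem foldl_inter_eq_filter (ns : List Int) (S : Int → PySem.Set Int) (init : List Int) :
    ns.foldl (fun cand nb => PySem.Set.inter cand (S nb)) init
      = init.filter (fun i => ns.all (fun nb => (S nb).contains i)) := by
  induction ns generalizing init with
  | nil => simp
  | cons n ns ih =>
    rw [List.foldl_cons, ih, PySem.Set.inter, List.filter_filter]
    refine List.filter_congr ?_
    intro x _
    simp [Bool.and_comm]

-- membership in the index set = membership of nb in the k-th subtable
theorem mem_pvIndices (T : List (List Int)) (nb : Int) (k : Nat) (hk : k < T.length) :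
    ((k : Int) ∈ pvIndices T nb) ↔ nb ∈ T[k] := by
  unfold pvIndices
  rw [PySem.Set.mem_ofList, List.mem_filterMap]
  constructor
  · rintro ⟨p, hp, hpk⟩
    rw [PySem.List.mem_enumerate_iff] at hp
    obtain ⟨j, hj, rfl⟩ := hp
    split at hpk
    · rename_i hcj
      have hjk : j = k := by
        have h0 : ((0 : Int) + (j : Nat)) = (k : Int) := Option.some.inj hpk
        omega
      subst hjk
      simpa [List.contains_eq_mem] using hcj
    · exact absurd hpk.symm (Option.some_ne_none _)
  · intro h
    refine ⟨((0 : Int) + (k : Nat), T[k]), ?_, ?_⟩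
    · exact (PySem.List.mem_enumerate_iff _ _ _).mpr ⟨k, hk, rfl⟩
    · simp [h]

-- counting a predicate of the entries over enumerate = counting over the list
theorem countP_enumerate (T : List (List Int)) (Q : List Int → Bool) (s : Int) :
    (PySem.List.enumerate T s).countP (fun p => Q p.2) = T.countP Q := by
  induction T generalizing s with
  | nil => simp [PySem.List.enumerate]
  | cons t ts ih =>
    rw [PySem.List.enumerate_cons]
    simp [List.countP_cons, ih]

theorem nodup_pyRange_len (n : Nat) : (PySem.List.pyRange 0 (n : Int) 1).Nodup := by
  rw [PySem.List.pyRange_of_pos _ _ (by norm_num)]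
  exact (List.nodup_range).map (fun a b h => by simpa using h)

theorem count_candidates (nuplet : List Int) (T : List (List Int)) :
    (nuplet.foldl (fun cand nb => PySem.Set.inter cand (pvIndices T nb))
        (PySem.Set.ofList (PySem.List.pyRange 0 (T.length : Int) 1))).length
      = T.countP (fun tab => nuplet.all (fun nb => tab.contains nb)) := by
  rw [foldl_inter_eq_filter,
    PySem.Set.ofList_eq_self_of_nodup _ (nodup_pyRange_len T.length)]
  have hrange : PySem.List.pyRange 0 (T.length : Int) 1
      = (PySem.List.enumerate T 0).map (fun p => p.1) := by
    rw [PySem.List.map_fst_enumerate]; norm_num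
  rw [hrange, List.filter_map, List.length_map,
    List.filter_congr (q := fun p => nuplet.all (fun nb => p.2.contains nb)) ?_,
    ← List.countP_eq_length_filter]
  · exact countP_enumerate T (fun tab => nuplet.all (fun nb => tab.contains nb)) 0
  intro p hp
  rw [PySem.List.mem_enumerate_iff] at hp
  obtain ⟨k, hk, rfl⟩ := hp
  simp only [Function.comp_apply]
  congr 1
  funext nb
  rw [PySem.Set.contains_eq_decide, List.contains_eq_mem, decide_eq_decide,
    show ((0 : Int) + (k : Nat)) = ((k : Nat) : Int) by omega]
  exact mem_pvIndices T nb k hk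

-- ===== VERDICT (by name: the statement is the Claim_ definition above) =====
theorem apparaitEpsilonFois_spec : Claim_equal_apparaitEpsilonFois := by
  intro nuplet T epsilon _
  unfold Spec_apparaitEpsilonFois apparaitEpsilonFois apparaitEpsilonFois_alt
  simp only [cpfA_eq]
  by_cases hnd : nuplet.Nodup
  · rw [if_neg (by simp [hnd]), if_neg (by simp [ofList_length_eq_iff, hnd])]
    rw [PySem.List.foldl_if_add_one (fun tab => contientA tab nuplet), count_candidates]
    have hc : List.countP (fun tab => contientA tab nuplet) T
        = List.countP (fun tab => nuplet.all fun nb => tab.contains nb) T := by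
      refine List.countP_congr ?_
      intro tab _
      rw [contientA_eq]
    rw [hc, zero_add]
  · rw [if_pos (by simp [hnd]), if_pos (by simp [ofList_length_eq_iff, hnd])]
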